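-- pv_equiv track=rewrite | github.com/opendemo-work/opendemo-cli | opendemo/core/demo_repository.py | _looks_like_library_name
-- ===== SOURCE A (Python) =====
-- def _looks_like_library_name(keyword: str) -> bool:
--     """
--     判断关键字是否看起来像库名
--
--     库名特征：
--     - 单个单词（无空格）
--     - 全小写或带连字符/下划线
--     - 不包含中文
--     - 长度适中（2-30字符）
--
--     Args:
--         keyword: 待检测的关键字
--
--     Returns:
--         是否看起来像库名
--     """
--     if not keyword:
--         return False
--
--     # 转小写
--     kw = keyword.lower().strip()
--
--     # 长度检查
--     if len(kw) < 2 or len(kw) > 30: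
--         return False
--
--     # 不能包含中文字符
--     for char in kw:
--         if "\u4e00" <= char <= "\u9fff":
--             return False
--
--     # 只允许字母、数字、连字符、下划线
--     allowed_chars = set("abcdefghijklmnopqrstuvwxyz0123456789-_")
--     if not all(c in allowed_chars for c in kw):
--         return False
--
--     # 必须以字母开头
--     if not kw[0].isalpha():
--         return False
--
--     return True
-- ===== SOURCE B (Python) =====
-- def _looks_like_library_name(keyword: str) -> bool:
--     """Counting DFA over the stripped/lowered string instead of A's staged guard
--     checks: state = chars consumed (dead state -1); accept iff final state in 2..30."""
--     kw = keyword.lower().strip()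
--     state = 0
--     for c in kw:
--         if state < 0 or state >= 30:
--             state = -1
--         elif state == 0:
--             state = 1 if 'a' <= c <= 'z' else -1
--         else:
--             state = state + 1 if ('a' <= c <= 'z' or '0' <= c <= '9'
--                                   or c == '-' or c == '_') else -1
--     return 2 <= state <= 30
-- ===== Notes on version B (the rewrite author's own statement) =====
-- stated objective: alternative
-- what changed: A's staged guard checks (empty guard, length window, a dead CJK scan, a set-membership pass, then a separate isalpha test on the first char) are replaced by a single-pass counting DFA: the state is the number of characters consumed (with a dead state -1 entered on a disallowed character, a non-letter first character or a 31st character), and the string is accepted iff the final state lies in 2..30.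
import Mathlib
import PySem

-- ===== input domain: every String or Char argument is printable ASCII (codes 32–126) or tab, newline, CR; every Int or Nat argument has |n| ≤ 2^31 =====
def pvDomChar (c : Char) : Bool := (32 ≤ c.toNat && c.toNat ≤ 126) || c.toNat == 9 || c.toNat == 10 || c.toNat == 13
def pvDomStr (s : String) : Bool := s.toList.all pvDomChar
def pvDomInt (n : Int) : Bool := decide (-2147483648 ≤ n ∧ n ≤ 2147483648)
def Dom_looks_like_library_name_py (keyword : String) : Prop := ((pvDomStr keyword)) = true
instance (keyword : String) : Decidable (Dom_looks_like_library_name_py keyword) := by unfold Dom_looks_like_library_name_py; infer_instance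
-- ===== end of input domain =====

-- B replaces A's staged guard checks (length window, dead CJK scan, set pass, isalpha)
-- by a single-pass counting DFA (state = chars consumed, dead state -1, accept 2..30);
-- objective: alternative, same return value on every input.

-- ===== PORT A =====
-- allowed_chars = set("abcdefghijklmnopqrstuvwxyz0123456789-_")
def pvAllowed : PySem.Set Char := PySem.Set.ofList "abcdefghijklmnopqrstuvwxyz0123456789-_".toList

-- the 'for char in kw: if "\u4e00" <= char <= "\u9fff": return False' loop
def pvCjkAny : List Char → Bool
  | [] => false
  | c :: rest => if '\u4E00' ≤ c && c ≤ '\u9FFF' then true else pvCjkAny rest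

def looks_like_library_name_py (keyword : String) : Bool :=
  if keyword.toList.isEmpty then false          -- if not keyword: return False
  else
    let kw := PySem.Chars.strip (PySem.Chars.lower keyword.toList)   -- kw = keyword.lower().strip()
    if kw.length < 2 ∨ 30 < kw.length then false
    else if pvCjkAny kw then false
    else if !(kw.all (fun c => PySem.Set.contains pvAllowed c)) then false
    else if !(match PySem.List.pyGet? kw 0 with                      -- kw[0].isalpha(); len kw ≥ 2 here
              | some c => PySem.Chars.isalpha c
              | none => false) then false
    else true

-- ===== PORT B =====
-- one DFA transition: state = number of chars consumed so far, -1 = dead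
def pvStep (state : Int) (c : Char) : Int :=
  if state < 0 || decide (30 ≤ state) then -1
  else if state == 0 then (if 'a' ≤ c && c ≤ 'z' then 1 else -1)
  else if ('a' ≤ c && c ≤ 'z') || ('0' ≤ c && c ≤ '9') || c == '-' || c == '_'
       then state + 1 else -1

def looks_like_library_name_py_alt (keyword : String) : Bool :=
  let kw := PySem.Chars.strip (PySem.Chars.lower keyword.toList)     -- kw = keyword.lower().strip()
  let s := kw.foldl pvStep 0                                         -- the for-loop over kw
  decide (2 ≤ s ∧ s ≤ 30)

-- ===== PRECONDITION & SPEC =====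
def Spec_looks_like_library_name_py (keyword : String) (out : Bool) : Prop := out = looks_like_library_name_py_alt keyword
instance (keyword : String) (out : Bool) : Decidable (Spec_looks_like_library_name_py keyword out) := by unfold Spec_looks_like_library_name_py; infer_instance

-- ===== CLAIM (what is proved, stated in full; the proofs are below) =====
def Claim_equal_looks_like_library_name_py : Prop := ∀ (keyword : String), Dom_looks_like_library_name_py keyword → Spec_looks_like_library_name_py keyword (looks_like_library_name_py keyword)

-- ===== LEMMAS AND PROOFS =====

-- B's character class as a predicate (used only in the proofs below)
def pvClassChar (c : Char) : Bool :=
  ('a' ≤ c && c ≤ 'z') || ('0' ≤ c && c ≤ '9') || c == '-' || c == '_'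

-- membership in A's allowed set is exactly the class predicate
lemma pv_contains_eq_class (c : Char) : PySem.Set.contains pvAllowed c = pvClassChar c := by
  have h : PySem.Set.contains pvAllowed c = ("abcdefghijklmnopqrstuvwxyz0123456789-_".toList.contains c) := rfl
  have hl : "abcdefghijklmnopqrstuvwxyz0123456789-_".toList =
    ['a','b','c','d','e','f','g','h','i','j','k','l','m','n','o','p','q','r','s','t','u','v','w','x','y','z',
     '0','1','2','3','4','5','6','7','8','9','-','_'] := by decide
  rw [h, hl, Bool.eq_iff_iff, List.contains_iff_mem]
  simp only [List.mem_cons, List.not_mem_nil, or_false, pvClassChar, Bool.or_eq_true,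
    Bool.and_eq_true, decide_eq_true_eq, beq_iff_eq, Char.le_def, UInt32.le_iff_toNat_le,
    Char.ext_iff, UInt32.ext_iff, (show ('a').val.toNat = 97 by rfl), (show ('b').val.toNat = 98 by rfl), (show ('c').val.toNat = 99 by rfl), (show ('d').val.toNat = 100 by rfl), (show ('e').val.toNat = 101 by rfl), (show ('f').val.toNat = 102 by rfl), (show ('g').val.toNat = 103 by rfl), (show ('h').val.toNat = 104 by rfl), (show ('i').val.toNat = 105 by rfl), (show ('j').val.toNat = 106 by rfl), (show ('k').val.toNat = 107 by rfl), (show ('l').val.toNat = 108 by rfl), (show ('m').val.toNat = 109 by rfl), (show ('n').val.toNat = 110 by rfl), (show ('o').val.toNat = 111 by rfl), (show ('p').val.toNat = 112 by rfl), (show ('q').val.toNat = 113 by rfl), (show ('r').val.toNat = 114 by rfl), (show ('s').val.toNat = 115 by rfl), (show ('t').val.toNat = 116 by rfl), (show ('u').val.toNat = 117 by rfl), (show ('v').val.toNat = 118 by rfl), (show ('w').val.toNat = 119 by rfl), (show ('x').val.toNat = 120 by rfl), (show ('y').val.toNat = 121 by rfl), (show ('z').val.toNat = 122 by rfl), (show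 ('0').val.toNat = 48 by rfl), (show ('1').val.toNat = 49 by rfl), (show ('2').val.toNat = 50 by rfl), (show ('3').val.toNat = 51 by rfl), (show ('4').val.toNat = 52 by rfl), (show ('5').val.toNat = 53 by rfl), (show ('6').val.toNat = 54 by rfl), (show ('7').val.toNat = 55 by rfl), (show ('8').val.toNat = 56 by rfl), (show ('9').val.toNat = 57 by rfl), (show ('-').val.toNat = 45 by rfl), (show ('_').val.toNat = 95 by rfl)]
  omega

-- characters of the class are not CJK
lemma pv_class_not_cjk (c : Char) (h : pvClassChar c = true) : ('\u4E00' ≤ c && c ≤ '\u9FFF') = false := by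
  simp only [pvClassChar, Bool.or_eq_true, Bool.and_eq_true, decide_eq_true_eq, beq_iff_eq,
    Char.le_def, UInt32.le_iff_toNat_le, Char.ext_iff, UInt32.ext_iff, (show ('a').val.toNat = 97 by rfl), (show ('z').val.toNat = 122 by rfl), (show ('0').val.toNat = 48 by rfl), (show ('9').val.toNat = 57 by rfl), (show ('-').val.toNat = 45 by rfl), (show ('_').val.toNat = 95 by rfl),
    (show ('\u4E00').val.toNat = 19968 by rfl), (show ('\u9FFF').val.toNat = 40959 by rfl),
    Bool.and_eq_false_iff, decide_eq_false_iff_not, not_le] at h ⊢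
  omega

lemma pv_all_class_cjk_false (l : List Char) (h : l.all pvClassChar = true) : pvCjkAny l = false := by
  induction l with
  | nil => rfl
  | cons c t ih =>
    simp only [List.all_cons, Bool.and_eq_true] at h
    simp only [pvCjkAny, pv_class_not_cjk c h.1, ih h.2, if_false, Bool.false_eq_true]

-- on the class, Python isalpha is exactly the a–z range test
lemma pv_isalpha_of_class (c : Char) (h : pvClassChar c = true) :
    PySem.Chars.isalpha c = ('a' ≤ c && c ≤ 'z') := by
  have hA : PySem.Chars.isalpha c = (('a' ≤ c && c ≤ 'z') || ('A' ≤ c && c ≤ 'Z')) := by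
    simp [PySem.Chars.isalpha, PySem.Chars.isupper, PySem.Chars.islower, Bool.or_comm]
  rw [hA]
  have hAZ : (decide ('A' ≤ c) && decide (c ≤ 'Z')) = false := by
    simp only [pvClassChar, Bool.or_eq_true, Bool.and_eq_true, decide_eq_true_eq, beq_iff_eq,
      Char.le_def, UInt32.le_iff_toNat_le, Char.ext_iff, UInt32.ext_iff,
      (show ('a').val.toNat = 97 by rfl), (show ('z').val.toNat = 122 by rfl),
      (show ('0').val.toNat = 48 by rfl), (show ('9').val.toNat = 57 by rfl),
      (show ('-').val.toNat = 45 by rfl), (show ('_').val.toNat = 95 by rfl)] at h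
    simp only [Bool.and_eq_false_iff, decide_eq_false_iff_not, not_le, Char.le_def,
      UInt32.le_iff_toNat_le, (show ('A').val.toNat = 65 by rfl), (show ('Z').val.toNat = 90 by rfl)]
    omega
  rw [hAZ, Bool.or_false]

-- the dead state absorbs
lemma pv_stuck (l : List Char) : l.foldl pvStep (-1) = -1 := by
  induction l with
  | nil => rfl
  | cons c t ih => simpa [pvStep] using ih

-- running the DFA from a live positive state counts the characters of the class
lemma pv_run1 (l : List Char) (k : Int) (h1 : 1 ≤ k) (h2 : k ≤ 30) :
    l.foldl pvStep k =
      if l.all pvClassChar = true ∧ k + l.length ≤ 30 then k + l.length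
      else if l = [] then k else -1 := by
  induction l generalizing k with
  | nil => simp
  | cons c t ih =>
    by_cases hk : (30 : Int) ≤ k
    · have hstep : pvStep k c = -1 := by
        simp [pvStep, decide_eq_true hk]
      have hno : ¬ ((c :: t).all pvClassChar = true ∧ k + ((c :: t).length : Int) ≤ 30) := by
        rintro ⟨-, h⟩; simp at h; omega
      rw [List.foldl_cons, hstep, pv_stuck, if_neg hno, if_neg (by simp)]
    · by_cases hc : pvClassChar c = true
      · have hstep : pvStep k c = k + 1 := by
          have h0 : (k == 0) = false := by simp; omega
          simp only [pvStep, pvClassChar] at hc ⊢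
          rw [if_neg (by simp; omega), h0, if_neg (by simp), if_pos hc]
        rw [List.foldl_cons, hstep, ih (k + 1) (by omega) (by omega)]
        by_cases ht : t = []
        · subst ht; simp [hc]; omega
        · have hlen : ((c :: t).length : Int) = (t.length : Int) + 1 := by simp
          by_cases hall : t.all pvClassChar = true
          · by_cases hfit : k + 1 + (t.length : Int) ≤ 30
            · rw [if_pos ⟨hall, hfit⟩, if_pos (by simp [hc, hall]; omega)]
              simp only [List.length_cons]; push_cast; ring
            · rw [if_neg (by rintro ⟨-, h⟩; omega), if_neg ht,
                  if_neg (by rintro ⟨-, h⟩; rw [hlen] at h; omega), if_neg (by simp)]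
          · rw [if_neg (by rintro ⟨h, -⟩; exact hall h), if_neg ht,
                if_neg (by rintro ⟨h, -⟩; rw [List.all_cons, hc, Bool.true_and] at h; exact hall h),
                if_neg (by simp)]
      · have hstep : pvStep k c = -1 := by
          have h0 : (k == 0) = false := by simp; omega
          simp only [pvStep, pvClassChar] at hc ⊢
          rw [if_neg (by simp; omega), h0, if_neg (by simp), if_neg hc]
        rw [List.foldl_cons, hstep, pv_stuck]
        rw [if_neg (by rintro ⟨h, -⟩; rw [List.all_cons] at h; exact hc ((Bool.and_eq_true _ _).mp h).1),
            if_neg (by simp)]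

-- the DFA's acceptance equals the staged boolean characterization
lemma pv_dfa_eq (l : List Char) :
    decide (2 ≤ l.foldl pvStep 0 ∧ l.foldl pvStep 0 ≤ 30)
      = ((decide (2 ≤ l.length) && decide (l.length ≤ 30))
          && (match PySem.List.pyGet? l 0 with
              | some c => ('a' ≤ c && c ≤ 'z')
              | none => false)
          && l.all pvClassChar) := by
  match l with
  | [] => rfl
  | c :: t =>
    have hget : PySem.List.pyGet? (c :: t) 0 = some c := by
      simp [PySem.List.pyGet?, PySem.List.pyIdx?]
    have hmatch : (match PySem.List.pyGet? (c :: t) 0 with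
                   | some c => ('a' ≤ c && c ≤ 'z')
                   | none => false) = ('a' ≤ c && c ≤ 'z') := by rw [hget]
    rw [hmatch]
    by_cases hfirst : ('a' ≤ c && c ≤ 'z') = true
    · have hstep : pvStep 0 c = 1 := by simp [pvStep, hfirst]
      have hcC : pvClassChar c = true := by simp [pvClassChar, hfirst]
      rw [List.foldl_cons, hstep, pv_run1 t 1 (by omega) (by omega)]
      by_cases hall : t.all pvClassChar = true
      · by_cases hfit : (1 : Int) + (t.length : Int) ≤ 30
        · rw [if_pos ⟨hall, hfit⟩]
          have hlist : (c :: t).all pvClassChar = true := by simp [hcC, hall]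
          rw [hfirst, hlist]
          simp only [Bool.and_true, List.length_cons]
          rw [Bool.eq_iff_iff]
          simp only [decide_eq_true_eq, Bool.and_eq_true]
          push_cast
          omega
        · rw [if_neg (by rintro ⟨-, h⟩; omega)]
          have h30 : decide ((c :: t).length ≤ 30) = false := by
            simp only [decide_eq_false_iff_not, List.length_cons]; omega
          rw [h30]
          by_cases ht : t = [] <;> simp [ht]
      · rw [if_neg (by rintro ⟨h, -⟩; exact hall h)]
        have hlist : (c :: t).all pvClassChar = false := by
          simp only [List.all_cons, Bool.and_eq_false_iff]
          exact Or.inr (Bool.eq_false_iff.mpr hall)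
        rw [hlist]
        by_cases ht : t = []
        · subst ht; simp at hall
        · rw [if_neg ht]; simp
    · have hstep : pvStep 0 c = -1 := by
        simp only [pvStep]
        rw [if_neg (by simp), if_pos (by simp), if_neg hfirst]
      rw [List.foldl_cons, hstep, pv_stuck, Bool.eq_false_iff.mpr hfirst]
      simp

-- A's staged guards equal the staged boolean characterization
lemma pv_body_eq (l : List Char) :
    (if l.length < 2 ∨ 30 < l.length then false
     else if pvCjkAny l then false
     else if !(l.all (fun c => PySem.Set.contains pvAllowed c)) then false
     else if !(match PySem.List.pyGet? l 0 with
               | some c => PySem.Chars.isalpha c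
               | none => false) then false
     else true)
    = ((decide (2 ≤ l.length) && decide (l.length ≤ 30))
        && (match PySem.List.pyGet? l 0 with
            | some c => ('a' ≤ c && c ≤ 'z')
            | none => false)
        && l.all pvClassChar) := by
  match l with
  | [] => rfl
  | c :: t =>
    have hget : PySem.List.pyGet? (c :: t) 0 = some c := by
      simp [PySem.List.pyGet?, PySem.List.pyIdx?]
    by_cases hlen : (c :: t).length < 2 ∨ 30 < (c :: t).length
    · have hr : decide (2 ≤ (c :: t).length) = false ∨ decide ((c :: t).length ≤ 30) = false := by
        rcases hlen with h | h
        · exact Or.inl (decide_eq_false (by omega))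
        · exact Or.inr (decide_eq_false (by omega))
      rw [if_pos hlen]
      rcases hr with h | h <;> rw [h] <;> simp
    · rw [if_neg hlen]
      rcases not_or.mp hlen with ⟨ha, hb⟩
      have h2 : decide (2 ≤ (c :: t).length) = true := decide_eq_true (by omega)
      have h30 : decide ((c :: t).length ≤ 30) = true := decide_eq_true (by omega)
      have hallEq : ((c :: t).all (fun x => PySem.Set.contains pvAllowed x))
          = ((c :: t).all pvClassChar) := by
        simp only [pv_contains_eq_class]
      by_cases hall : (c :: t).all pvClassChar = true
      · have hcjk : pvCjkAny (c :: t) = false := pv_all_class_cjk_false _ hall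
        have hc : pvClassChar c = true := by
          simp only [List.all_cons, Bool.and_eq_true] at hall; exact hall.1
        rw [hcjk, hallEq, hall, hget, h2, h30, if_neg (by simp)]
        simp only [Bool.not_true, Bool.true_and, Bool.and_true, pv_isalpha_of_class c hc]
        cases hz : ('a' ≤ c && c ≤ 'z') <;> simp
      · have hall' : (c :: t).all pvClassChar = false := Bool.eq_false_iff.mpr hall
        rw [hallEq, hall', hget, h2, h30]
        by_cases hcjk : pvCjkAny (c :: t) = true
        · rw [hcjk]; simp
        · rw [Bool.eq_false_iff.mpr hcjk]; simp

-- ===== VERDICT (by name: the statement is the Claim_ definition above) =====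
theorem looks_like_library_name_py_spec : Claim_equal_looks_like_library_name_py := by
  intro keyword _
  unfold Spec_looks_like_library_name_py looks_like_library_name_py looks_like_library_name_py_alt
  by_cases hemp : keyword.toList.isEmpty
  · have h0 : keyword.toList = [] := by simpa [List.isEmpty_iff] using hemp
    simp only [hemp, if_true]
    rw [h0]
    decide
  · simp only [hemp, if_false, Bool.false_eq_true]
    exact (pv_body_eq _).trans (pv_dfa_eq _).symm
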